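-- pv_equiv track=rewrite | github.com/ethanbsung/kalshi | src/kalshi_bot/data/db.py | _split_migration_sections
-- ===== SOURCE A (Python) =====
-- def _split_migration_sections(sql: str) -> dict[str, str]:
--     sections: dict[str, list[str]] = {}
--     current = None
--     for line in sql.splitlines():
--         if line.startswith("-- ") and line[3:].strip():
--             current = line[3:].strip()
--             sections.setdefault(current, [])
--             continue
--         if current is not None:
--             sections[current].append(line)
--     return {key: "\n".join(lines).strip() for key, lines in sections.items()}
-- ===== SOURCE B (Python) =====
-- def _split_migration_sections(sql: str) -> dict[str, str]:
--     def is_header(line):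
--         return line.startswith("-- ") and bool(line[3:].strip())
--
--     bodies = {}
--     rest = sql.splitlines()
--     # skip the prologue before the first header
--     while rest and not is_header(rest[0]):
--         rest = rest[1:]
--     # extract one whole section (header + maximal run of body lines) at a time
--     while rest:
--         header, rest = rest[0], rest[1:]
--         body = []
--         while rest and not is_header(rest[0]):
--             body.append(rest[0])
--             rest = rest[1:]
--         bodies.setdefault(header[3:].strip(), []).extend(body)
--     return {k: "\n".join(v).strip() for k, v in bodies.items()}
-- ===== Notes on version B (the rewrite author's own statement) =====
-- stated objective: alternative
-- what changed: Replaced A's streaming pass with a mutable current-section state variable and per-line dict appends by a section-at-a-time decomposition: skip the prologue, then repeatedly take a header and the maximal run of following body lines, merging each whole run into the dict at once.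
import Mathlib
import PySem

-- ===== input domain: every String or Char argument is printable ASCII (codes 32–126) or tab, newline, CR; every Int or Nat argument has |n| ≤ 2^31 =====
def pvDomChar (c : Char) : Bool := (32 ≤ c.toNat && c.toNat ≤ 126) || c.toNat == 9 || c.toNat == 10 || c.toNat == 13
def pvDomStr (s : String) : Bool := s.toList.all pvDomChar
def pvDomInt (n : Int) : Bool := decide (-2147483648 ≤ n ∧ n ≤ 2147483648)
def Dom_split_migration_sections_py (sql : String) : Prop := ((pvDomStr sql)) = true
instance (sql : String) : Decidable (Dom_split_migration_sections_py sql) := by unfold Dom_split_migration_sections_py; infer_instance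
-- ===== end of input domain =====

-- B replaces A's streaming pass (a mutable current-section name, one dict append per line) by a
-- section-at-a-time decomposition: skip the prologue, then repeatedly take a header and the
-- maximal run of following body lines and merge that whole run into the dict at once
-- (objective: alternative decomposition, same O(n) cost).

-- shared helper: the header test 'line.startswith("-- ") and line[3:].strip()' and the name,
-- written identically in both Pythons
def pvHdrName (l : String) : String := PySem.Str.strip (PySem.Str.slice l (some 3) none)
def pvIsHdr (l : String) : Bool := PySem.Str.startswith l "-- " && (pvHdrName l != "")

-- ===== PORT A =====
-- state = (sections, currently open section name); the per-line append never raises because the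
-- open name is always a key of sections (it was just setdefault'ed); modify with default [] is exact there.
def pvStepA (st : PySem.Dict String (List String) × Option String) (line : String) :
    PySem.Dict String (List String) × Option String :=
  if pvIsHdr line then
    (st.1.setdefault (pvHdrName line) [], some (pvHdrName line))
  else
    match st.2 with
    | some c => (st.1.modify c [] (fun ls => ls ++ [line]), st.2)
    | none => st

def split_migration_sections_py (sql : String) : List (String × String) :=
  let st := (PySem.Str.splitlines sql).foldl pvStepA (PySem.Dict.empty, none)
  st.1.items.map (fun p => (p.1, PySem.Str.strip (PySem.Str.join "\n" p.2)))

-- ===== PORT B =====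
-- `while rest and not is_header(rest[0]): rest = rest[1:]`
def pvSkip : List String → List String
  | [] => []
  | l :: t => if pvIsHdr l then l :: t else pvSkip t

-- inner `while`: collect the body run and the remaining lines
def pvSpan : List String → List String × List String
  | [] => ([], [])
  | l :: t =>
    if pvIsHdr l then ([], l :: t)
    else
      let p := pvSpan t
      (l :: p.1, p.2)

theorem pvSpan_snd_length_le : ∀ t : List String, (pvSpan t).2.length ≤ t.length := by
  intro t
  induction t with
  | nil => simp [pvSpan]
  | cons l t ih =>
    simp only [pvSpan]
    split
    · simp
    · simpa using Nat.le_succ_of_le ih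

-- outer `while rest:` loop
def pvCollect : List String → PySem.Dict String (List String) → PySem.Dict String (List String)
  | [], d => d
  | h :: t, d =>
    let p := pvSpan t
    pvCollect p.2 ((d.setdefault (pvHdrName h) []).modify (pvHdrName h) [] (fun ls => ls ++ p.1))
termination_by l _ => l.length
decreasing_by exact Nat.lt_succ_of_le (pvSpan_snd_length_le t)

def split_migration_sections_py_alt (sql : String) : List (String × String) :=
  let bodies := pvCollect (pvSkip (PySem.Str.splitlines sql)) PySem.Dict.empty
  bodies.items.map (fun p => (p.1, PySem.Str.strip (PySem.Str.join "\n" p.2)))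

-- ===== PRECONDITION & SPEC =====
def Spec_split_migration_sections_py (sql : String) (out : List (String × String)) : Prop := out = split_migration_sections_py_alt sql
instance (sql : String) (out : List (String × String)) : Decidable (Spec_split_migration_sections_py sql out) := by unfold Spec_split_migration_sections_py; infer_instance

-- ===== CLAIM (what is proved, stated in full; the proofs are below) =====
def Claim_equal_split_migration_sections_py : Prop := ∀ (sql : String), Dom_split_migration_sections_py sql → Spec_split_migration_sections_py sql (split_migration_sections_py sql)

-- ===== LEMMAS AND PROOFS =====

theorem pvSkip_eq (ls : List String) : pvSkip ls = ls.dropWhile (fun l => !pvIsHdr l) := by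
  induction ls with
  | nil => rfl
  | cons l t ih =>
    simp only [pvSkip, List.dropWhile_cons]
    by_cases h : pvIsHdr l = true <;> simp [h, ih]

theorem pvSpan_eq (ls : List String) :
    pvSpan ls = (ls.takeWhile (fun l => !pvIsHdr l), ls.dropWhile (fun l => !pvIsHdr l)) := by
  induction ls with
  | nil => rfl
  | cons l t ih =>
    simp only [pvSpan, List.takeWhile_cons, List.dropWhile_cons]
    by_cases h : pvIsHdr l = true <;> simp [h, ih]

-- two modifies at the same key compose
theorem pv_modify_modify (d : PySem.Dict String (List String)) (k : String)
    (f g : List String → List String) :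
    (d.modify k [] f).modify k [] g = d.modify k [] (fun v => g (f v)) := by
  show (d.insert k (f (d.getD k []))).insert k
      (g ((d.insert k (f (d.getD k []))).getD k [])) = d.insert k (g (f (d.getD k [])))
  rw [PySem.Dict.getD_insert_self, PySem.Dict.insert_insert_self]

-- re-inserting a key's own value is a no-op (keys unique)
theorem pv_insert_getD_self (d : PySem.Dict String (List String)) (k : String)
    (hc : d.contains k = true) (hnd : d.keys.Nodup) :
    d.insert k (d.getD k []) = d := by
  apply PySem.Dict.ext
  rw [PySem.Dict.items_insert_of_contains d _ hc]
  conv_rhs => rw [← List.map_id d.items]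
  apply List.map_congr_left
  intro p hp
  by_cases h : (p.1 == k) = true
  · have hk : p.1 = k := by simpa using h
    have hmem : (k, p.2) ∈ d.items := by rw [← hk]; exact hp
    have hg := PySem.Dict.getD_of_mem_items d hmem hnd []
    rw [if_pos h, ← hk] at *
    rw [hg]
    rfl
  · simp [h]

theorem pv_modify_append_nil (d : PySem.Dict String (List String)) (k : String)
    (hc : d.contains k = true) (hnd : d.keys.Nodup) :
    d.modify k [] (fun v => v ++ []) = d := by
  show d.insert k (d.getD k [] ++ []) = d
  rw [List.append_nil]
  exact pv_insert_getD_self d k hc hnd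

theorem pv_nodup_modify (d : PySem.Dict String (List String)) (k : String)
    (f : List String → List String) (hnd : d.keys.Nodup) :
    (d.modify k [] f).keys.Nodup := by
  have h := PySem.Dict.keys_modify d k [] f
  rw [show (d.modify k [] f).keys.Nodup ↔ (d.insert k (f (d.getD k []))).keys.Nodup from by rw [h]]
  exact PySem.Dict.nodup_keys_insert d k _ hnd

theorem pv_nodup_setdefault (d : PySem.Dict String (List String)) (k : String)
    (hnd : d.keys.Nodup) : (d.setdefault k []).keys.Nodup := by
  by_cases hc : d.contains k = true
  · rw [PySem.Dict.setdefault_of_contains d _ hc]; exact hnd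
  · rw [PySem.Dict.setdefault_of_not_contains d _ (by simpa using hc)]
    exact PySem.Dict.nodup_keys_insert d k _ hnd

-- A's fold from state (d, some c): the pending run of body lines goes to c, then the
-- remaining sections are collected exactly as B does
theorem pv_foldl_some (ls : List String) : ∀ (d : PySem.Dict String (List String)) (c : String),
    d.contains c = true → d.keys.Nodup →
    (ls.foldl pvStepA (d, some c)).1
      = pvCollect (ls.dropWhile (fun l => !pvIsHdr l))
          (d.modify c [] (fun v => v ++ ls.takeWhile (fun l => !pvIsHdr l))) := by
  induction ls with
  | nil =>
    intro d c hc hnd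
    simpa [pvCollect] using (pv_modify_append_nil d c hc hnd).symm
  | cons l t ih =>
    intro d c hc hnd
    by_cases h : pvIsHdr l = true
    · -- header line: A switches current; B opens a new section here
      rw [show (l :: t).foldl pvStepA (d, some c)
            = t.foldl pvStepA (d.setdefault (pvHdrName l) [], some (pvHdrName l)) from by
          simp [pvStepA, h]]
      rw [ih (d.setdefault (pvHdrName l) []) (pvHdrName l)
            (by rw [PySem.Dict.contains_setdefault]; simp)
            (pv_nodup_setdefault d _ hnd)]
      rw [List.dropWhile_cons_of_neg (by simp [h]),
          List.takeWhile_cons_of_neg (by simp [h]),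
          pv_modify_append_nil d c hc hnd]
      simp only [pvCollect, pvSpan_eq]
    · -- body line: A appends it to c; it is the head of B's current run
      rw [show (l :: t).foldl pvStepA (d, some c)
            = t.foldl pvStepA (d.modify c [] (fun v => v ++ [l]), some c) from by
          simp [pvStepA, h]]
      rw [ih (d.modify c [] (fun v => v ++ [l])) c
            (by rw [PySem.Dict.contains_modify]; simp [hc])
            (pv_nodup_modify d c _ hnd)]
      rw [List.dropWhile_cons_of_pos (by simp [h]),
          List.takeWhile_cons_of_pos (by simp [h]),
          pv_modify_modify]
      simp

-- A's fold from the initial state (d, none): prologue lines are dropped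
theorem pv_foldl_none (ls : List String) : ∀ (d : PySem.Dict String (List String)),
    d.keys.Nodup →
    (ls.foldl pvStepA (d, none)).1 = pvCollect (ls.dropWhile (fun l => !pvIsHdr l)) d := by
  induction ls with
  | nil => intro d _; simp [pvCollect]
  | cons l t ih =>
    intro d hnd
    by_cases h : pvIsHdr l = true
    · rw [show (l :: t).foldl pvStepA (d, none)
            = t.foldl pvStepA (d.setdefault (pvHdrName l) [], some (pvHdrName l)) from by
          simp [pvStepA, h]]
      rw [pv_foldl_some t (d.setdefault (pvHdrName l) []) (pvHdrName l)
            (by rw [PySem.Dict.contains_setdefault]; simp)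
            (pv_nodup_setdefault d _ hnd)]
      rw [List.dropWhile_cons_of_neg (by simp [h])]
      simp only [pvCollect, pvSpan_eq]
    · rw [show (l :: t).foldl pvStepA (d, none) = t.foldl pvStepA (d, none) from by
          simp [pvStepA, h]]
      rw [List.dropWhile_cons_of_pos (by simp [h])]
      exact ih d hnd

-- ===== VERDICT (by name: the statement is the Claim_ definition above) =====
theorem split_migration_sections_py_spec : Claim_equal_split_migration_sections_py := by
  intro sql _
  unfold Spec_split_migration_sections_py
  simp only [split_migration_sections_py, split_migration_sections_py_alt]
  rw [pv_foldl_none (PySem.Str.splitlines sql) PySem.Dict.empty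
        (by simp),
      pvSkip_eq]
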